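-- pv_equiv track=rewrite | github.com/lupangdesaili/arabicsrl | run.py | count_bracket
-- ===== SOURCE A (Python) =====
-- def count_bracket(string):
--     left = 0
--     right = 0
--     for char in string:
--         if char == "(":
--             left += 1
--         if char == ")":
--             right += 1
--     return left,right
-- ===== SOURCE B (Python) =====
-- def count_bracket(string):
--     def go(cs):
--         n = len(cs)
--         if n == 0:
--             return (0, 0)
--         if n == 1:
--             c = cs[0]
--             return (1 if c == "(" else 0, 1 if c == ")" else 0)
--         mid = n // 2
--         l1, r1 = go(cs[:mid])
--         l2, r2 = go(cs[mid:])
--         return (l1 + l2, r1 + r2)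
--     return go(list(string))
-- ===== Notes on version B (the rewrite author's own statement) =====
-- stated objective: alternative
-- what changed: Replaced A's single left-to-right accumulator loop by a divide-and-conquer recursion that splits the character list in half, counts each half recursively, and sums the pair of counts.
import Mathlib
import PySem

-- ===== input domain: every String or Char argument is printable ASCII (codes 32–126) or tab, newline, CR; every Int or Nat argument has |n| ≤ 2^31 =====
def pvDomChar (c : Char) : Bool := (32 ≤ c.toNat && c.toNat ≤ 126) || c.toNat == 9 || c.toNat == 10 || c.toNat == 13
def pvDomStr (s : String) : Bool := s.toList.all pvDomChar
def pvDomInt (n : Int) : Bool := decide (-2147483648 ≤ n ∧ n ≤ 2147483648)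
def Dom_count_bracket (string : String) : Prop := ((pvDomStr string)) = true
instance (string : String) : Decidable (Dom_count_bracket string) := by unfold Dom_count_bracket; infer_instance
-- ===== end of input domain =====

-- B replaces A's single accumulator loop by a divide-and-conquer recursion over halves (alternative; same cost).

-- ===== PORT A =====
-- for char in string: if char == "(": left += 1; if char == ")": right += 1
def count_bracket (string : String) : Int × Int :=
  string.toList.foldl
    (fun (lr : Int × Int) (char : Char) =>
      let left := if char == '(' then lr.1 + 1 else lr.1
      let right := if char == ')' then lr.2 + 1 else lr.2
      (left, right))
    (0, 0)

-- ===== PORT B =====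
-- go(cs): split the list at mid = n // 2, count each half recursively, add the pairs
def count_bracket_go (cs : List Char) : Int × Int :=
  if _h0 : cs.length = 0 then (0, 0)
  else if _h1 : cs.length = 1 then
    let c := cs.headI
    ((if c = '(' then 1 else 0), (if c = ')' then 1 else 0))
  else
    let mid := cs.length / 2
    let p := count_bracket_go (cs.take mid)
    let q := count_bracket_go (cs.drop mid)
    (p.1 + q.1, p.2 + q.2)
termination_by cs.length
decreasing_by
  · simp only [List.length_take]; omega
  · simp only [List.length_drop]; omega

def count_bracket_alt (string : String) : Int × Int :=
  count_bracket_go string.toList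

-- ===== PRECONDITION & SPEC =====
def Spec_count_bracket (string : String) (out : Int × Int) : Prop := out = count_bracket_alt string
instance (string : String) (out : Int × Int) : Decidable (Spec_count_bracket string out) := by unfold Spec_count_bracket; infer_instance

-- ===== CLAIM (what is proved, stated in full; the proofs are below) =====
def Claim_equal_count_bracket : Prop := ∀ (string : String), Dom_count_bracket string → Spec_count_bracket string (count_bracket string)

-- ===== LEMMAS AND PROOFS =====

-- B's divide-and-conquer returns the pair of character counts.
theorem count_bracket_go_eq (cs : List Char) :
    count_bracket_go cs = ((cs.count '(' : Int), (cs.count ')' : Int)) := by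
  induction cs using count_bracket_go.induct with
  | case1 cs h0 =>
    have : cs = [] := List.length_eq_zero_iff.mp h0
    subst this; simp [count_bracket_go]
  | case2 cs h0 h1 =>
    obtain ⟨c, rfl⟩ := List.length_eq_one_iff.mp h1
    by_cases hc1 : c = '(' <;> by_cases hc2 : c = ')' <;>
      simp_all [count_bracket_go]
  | case3 cs h0 h1 _mid ih1 ih2 =>
    rw [count_bracket_go]
    simp only [h0, h1, dite_false]
    rw [ih1, ih2]
    have h := List.take_append_drop (cs.length / 2) cs
    refine Prod.ext ?_ ?_ <;> simp only [] <;>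
      · conv_rhs => rw [← h]
        rw [List.count_append]; push_cast; ring

-- A's fold computes the pair of character counts, from any accumulator.
theorem foldl_bracket (cs : List Char) (l r : Int) :
    cs.foldl
      (fun (lr : Int × Int) (char : Char) =>
        let left := if char == '(' then lr.1 + 1 else lr.1
        let right := if char == ')' then lr.2 + 1 else lr.2
        (left, right))
      (l, r)
    = (l + cs.count '(', r + cs.count ')') := by
  induction cs generalizing l r with
  | nil => simp
  | cons x t ih =>
    simp only [List.foldl_cons, List.count_cons, ih]
    by_cases h1 : x = '(' <;> by_cases h2 : x = ')' <;>
      simp_all <;> omega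

-- ===== VERDICT (by name: the statement is the Claim_ definition above) =====
theorem count_bracket_spec : Claim_equal_count_bracket := by
  intro s _
  show count_bracket s = count_bracket_alt s
  rw [count_bracket, count_bracket_alt, foldl_bracket, count_bracket_go_eq]
  simp
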